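-- pv_equiv track=rewrite | github.com/anthonybench/weather-bot | toolchain/utils.py | sort_days
-- ===== SOURCE A (Python) =====
-- from typing import List
--
-- def sort_days(days: List[str], today: str) -> List[str]:
--   '''takes list of day-names and current day, returns days in order given current day'''
--
--   next_day = {'Monday':'Tuesday','Tuesday':'Wednesday','Wednesday':'Thursday','Thursday':'Friday','Friday':'Saturday','Saturday':'Sunday','Sunday':'Monday'}
--   payload = []
--   ptr     = next_day[today]
--   for i in range(len(days)):
--     payload.append(ptr)
--     ptr = next_day[ptr]
--   return payload
-- ===== SOURCE B (Python) =====
-- WEEK = ['Monday', 'Tuesday', 'Wednesday', 'Thursday', 'Friday', 'Saturday', 'Sunday']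
-- IDX = {name: i for i, name in enumerate(WEEK)}
--
-- def sort_days(days, today):
--   '''takes list of day-names and current day, returns days in order given current day'''
--   start = IDX[today]
--   return [WEEK[(start + 1 + i) % 7] for i in range(len(days))]
-- ===== Notes on version B (the rewrite author's own statement) =====
-- stated objective: idiomatic
-- what changed: B replaces A's stepwise successor-dict pointer chasing with position-plus-offset modular indexing into a fixed week list (start index looked up once).
import Mathlib
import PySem

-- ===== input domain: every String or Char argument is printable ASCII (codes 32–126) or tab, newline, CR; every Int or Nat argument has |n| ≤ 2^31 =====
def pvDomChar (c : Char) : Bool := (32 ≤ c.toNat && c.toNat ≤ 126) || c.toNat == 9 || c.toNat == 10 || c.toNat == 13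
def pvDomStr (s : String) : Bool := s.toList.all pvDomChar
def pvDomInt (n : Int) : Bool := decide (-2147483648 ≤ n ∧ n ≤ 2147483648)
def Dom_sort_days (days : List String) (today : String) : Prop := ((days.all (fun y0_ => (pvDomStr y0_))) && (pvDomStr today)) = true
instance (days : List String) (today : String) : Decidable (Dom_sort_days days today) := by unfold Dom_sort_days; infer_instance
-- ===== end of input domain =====

-- B replaces A's stepwise successor-dict pointer chasing with modular indexing into a fixed week list.

-- ===== PORT A =====
def nextDayDict : PySem.Dict String String :=
  PySem.Dict.ofList [("Monday","Tuesday"),("Tuesday","Wednesday"),("Wednesday","Thursday"),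
    ("Thursday","Friday"),("Friday","Saturday"),("Saturday","Sunday"),("Sunday","Monday")]

def sort_days (days : List String) (today : String) : List String :=
  -- ptr = next_day[today]; Python raises KeyError when get? = none — excluded by Pre_
  let ptr0 := (nextDayDict.get? today).getD ""
  ((PySem.List.pyRange 0 (days.length : Int) 1).foldl
    (fun (st : List String × String) _ =>
      (st.1 ++ [st.2], (nextDayDict.get? st.2).getD ""))
    (([] : List String), ptr0)).1

-- ===== PORT B =====
def weekList : List String :=
  ["Monday","Tuesday","Wednesday","Thursday","Friday","Saturday","Sunday"]

def idxDict : PySem.Dict String Int :=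
  PySem.Dict.ofList [("Monday",0),("Tuesday",1),("Wednesday",2),("Thursday",3),
    ("Friday",4),("Saturday",5),("Sunday",6)]

def sort_days_alt (days : List String) (today : String) : List String :=
  -- start = IDX[today]; Python raises KeyError when get? = none — excluded by Pre_
  let start := (idxDict.get? today).getD 0
  (PySem.List.pyRange 0 (days.length : Int) 1).map
    (fun i => (PySem.List.pyGet? weekList (PySem.Int.mod (start + 1 + i) 7)).getD "")

-- ===== PRECONDITION & SPEC =====
-- Pre_: today is one of the seven day names; otherwise both A and B raise KeyError.
def Pre_sort_days (days : List String) (today : String) : Prop :=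
  today ∈ weekList
instance (days : List String) (today : String) : Decidable (Pre_sort_days days today) := by
  unfold Pre_sort_days; infer_instance

def pvWitness_sort_days : List String × String := (["a","b","c"], "Friday")

def Spec_sort_days (days : List String) (today : String) (out : List String) : Prop := out = sort_days_alt days today
instance (days : List String) (today : String) (out : List String) : Decidable (Spec_sort_days days today out) := by unfold Spec_sort_days; infer_instance

-- ===== CLAIM (what is proved, stated in full; the proofs are below) =====
def Claim_equal_sort_days : Prop := ∀ (days : List String) (today : String), Dom_sort_days days today → Pre_sort_days days today → Spec_sort_days days today (sort_days days today)

-- ===== LEMMAS AND PROOFS =====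

/-- the day name at wheel position `k` (for `k < 7`). -/
def dayAt (k : Nat) : String := (weekList[k]?).getD ""

def stepA (st : List String × String) (_ : Int) : List String × String :=
  (st.1 ++ [st.2], (nextDayDict.get? st.2).getD "")

lemma succ_day (k : Nat) (hk : k < 7) :
    (nextDayDict.get? (dayAt k)).getD "" = dayAt ((k + 1) % 7) := by
  interval_cases k <;> decide

lemma loopA (s : Nat) (n : Nat) :
    (List.range n).foldl (fun st (_ : Nat) => stepA st 0) ([], dayAt ((s + 1) % 7)) =
    ((List.range n).map (fun i => dayAt ((s + 1 + i) % 7)), dayAt ((s + 1 + n) % 7)) := by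
  induction n with
  | zero => simp
  | succ n ih =>
    rw [List.range_succ, List.foldl_append, ih, List.map_append]
    simp only [List.foldl_cons, List.foldl_nil, List.map_cons, List.map_nil, stepA]
    congr 1
    rw [succ_day _ (Nat.mod_lt _ (by omega))]
    have h1 : (s + 1 + n) % 7 + 1 = ((s + 1 + n) % 7 + 1 % 7) := by omega
    rw [h1, ← Nat.add_mod]
    ring_nf

lemma elemB (s : Nat) (k : Nat) :
    (PySem.List.pyGet? weekList (PySem.Int.mod ((s : Int) + 1 + (k : Int)) 7)).getD "" =
    dayAt ((s + 1 + k) % 7) := by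
  have h1 : (s : Int) + 1 + (k : Int) = ((s + 1 + k : Nat) : Int) := by push_cast; ring
  have h2 : (7 : Int) = ((7 : Nat) : Int) := by norm_num
  rw [h1, h2, PySem.Int.mod_natCast, PySem.List.pyGet?_natCast]
  rfl

lemma main_eq (days : List String) (s : Nat) :
    ((PySem.List.pyRange 0 (days.length : Int) 1).foldl stepA
      (([] : List String), dayAt ((s + 1) % 7))).1 =
    (PySem.List.pyRange 0 (days.length : Int) 1).map
      (fun i => (PySem.List.pyGet? weekList (PySem.Int.mod ((s : Int) + 1 + i) 7)).getD "") := by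
  rw [PySem.List.pyRange_one]
  simp only [sub_zero, Int.toNat_natCast, List.foldl_map, List.map_map]
  rw [show (fun st (k : Nat) => stepA st ((0 : Int) + k)) = (fun st (_ : Nat) => stepA st 0) from rfl,
      loopA s]
  apply List.map_congr_left
  intro k _
  simp only [Function.comp]
  rw [zero_add, elemB s k]

-- ===== VERDICT (by name: the statement is the Claim_ definition above) =====
theorem sort_days_spec : Claim_equal_sort_days := by
  intro days today _ hpre
  unfold Spec_sort_days
  have hmem : today ∈ weekList := hpre
  simp only [weekList, List.mem_cons, List.not_mem_nil, or_false] at hmem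
  unfold sort_days sort_days_alt
  rcases hmem with h | h | h | h | h | h | h <;> subst h
  · have h0 : (nextDayDict.get? "Monday").getD "" = dayAt ((0 + 1) % 7) := by decide
    have h1 : (idxDict.get? "Monday").getD 0 = ((0 : Nat) : Int) := by decide
    simp only [h0, h1]; exact main_eq days 0
  · have h0 : (nextDayDict.get? "Tuesday").getD "" = dayAt ((1 + 1) % 7) := by decide
    have h1 : (idxDict.get? "Tuesday").getD 0 = ((1 : Nat) : Int) := by decide
    simp only [h0, h1]; exact main_eq days 1
  · have h0 : (nextDayDict.get? "Wednesday").getD "" = dayAt ((2 + 1) % 7) := by decide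
    have h1 : (idxDict.get? "Wednesday").getD 0 = ((2 : Nat) : Int) := by decide
    simp only [h0, h1]; exact main_eq days 2
  · have h0 : (nextDayDict.get? "Thursday").getD "" = dayAt ((3 + 1) % 7) := by decide
    have h1 : (idxDict.get? "Thursday").getD 0 = ((3 : Nat) : Int) := by decide
    simp only [h0, h1]; exact main_eq days 3
  · have h0 : (nextDayDict.get? "Friday").getD "" = dayAt ((4 + 1) % 7) := by decide
    have h1 : (idxDict.get? "Friday").getD 0 = ((4 : Nat) : Int) := by decide
    simp only [h0, h1]; exact main_eq days 4
  · have h0 : (nextDayDict.get? "Saturday").getD "" = dayAt ((5 + 1) % 7) := by decide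
    have h1 : (idxDict.get? "Saturday").getD 0 = ((5 : Nat) : Int) := by decide
    simp only [h0, h1]; exact main_eq days 5
  · have h0 : (nextDayDict.get? "Sunday").getD "" = dayAt ((6 + 1) % 7) := by decide
    have h1 : (idxDict.get? "Sunday").getD 0 = ((6 : Nat) : Int) := by decide
    simp only [h0, h1]; exact main_eq days 6
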